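-- pv_equiv track=rewrite | github.com/abdullahshamail/SSTD-23 | utilities.py | consecutive_true_indices
-- ===== SOURCE A (Python) =====
-- def consecutive_true_indices(bool_list):
--     true_indices = [i for i, x in enumerate(bool_list) if x]
--     consecutive_ranges = []
--     current_range = []
--     for i in range(len(true_indices)):
--         if not current_range:
--             current_range.append(true_indices[i])
--         elif true_indices[i] == current_range[-1] + 1:
--             current_range.append(true_indices[i])
--         else:
--             consecutive_ranges.append(current_range)
--             current_range = [true_indices[i]]
--     if current_range:
--         consecutive_ranges.append(current_range)
--     output_str = ''
--     for r in consecutive_ranges: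
--         if len(r) == 1:
--             output_str += str(r[0]) + ', '
--         else:
--             output_str += str(r[0]) + '-' + str(r[-1]) + ', '
--     return output_str[:-2]
-- ===== SOURCE B (Python) =====
-- def consecutive_true_indices(bool_list):
--     fragments = []
--     start = None
--     for i, x in enumerate(bool_list):
--         if x:
--             if start is None:
--                 start = i
--         else:
--             if start is not None:
--                 fragments.append(str(start) if start == i - 1 else str(start) + '-' + str(i - 1))
--                 start = None
--     if start is not None:
--         e = len(bool_list) - 1
--         fragments.append(str(start) if start == e else str(start) + '-' + str(e))
--     return ', '.join(fragments)
-- ===== Notes on version B (the rewrite author's own statement) =====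
-- stated objective: simpler
-- what changed: Replaced A's three passes (collect true indices, group them into consecutive runs, render with a trailing ', ' chopped by slicing) with a single edge-detecting scan over the bools that emits one fragment per run and joins them with ', '.
import Mathlib
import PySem

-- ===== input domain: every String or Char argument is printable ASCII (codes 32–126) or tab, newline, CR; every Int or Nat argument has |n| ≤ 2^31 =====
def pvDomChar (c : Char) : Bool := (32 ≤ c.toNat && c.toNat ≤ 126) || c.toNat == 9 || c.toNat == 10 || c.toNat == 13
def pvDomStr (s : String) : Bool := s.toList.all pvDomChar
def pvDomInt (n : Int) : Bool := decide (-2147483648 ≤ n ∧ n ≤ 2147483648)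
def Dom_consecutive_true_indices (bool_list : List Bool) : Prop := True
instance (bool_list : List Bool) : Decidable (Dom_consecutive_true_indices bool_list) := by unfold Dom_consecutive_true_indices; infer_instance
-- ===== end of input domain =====

-- B replaces A's three passes (collect true indices, group them, render + chop ', ')
-- by one edge-detecting scan over the bools that emits fragments joined with ', ' (objective: simpler).

-- ===== PORT A =====
-- true_indices = [i for i, x in enumerate(bool_list) if x]
def pvTrue (l : List Bool) (k : Int) : List Int :=
  (PySem.List.enumerate l k).filterMap (fun p => if p.2 then some p.1 else none)

-- body of 'for i in range(len(true_indices))' over state (consecutive_ranges, current_range)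
def pvStepA (st : List (List Int) × List Int) (ti : Int) : List (List Int) × List Int :=
  if st.2 = [] then (st.1, st.2 ++ [ti])
  else if ti = PySem.List.pyGetD st.2 (-1) 0 + 1 then (st.1, st.2 ++ [ti])
  else (st.1 ++ [st.2], [ti])

-- body of 'for r in consecutive_ranges' building output_str
def pvOutStep (acc : String) (r : List Int) : String :=
  if PySem.List.len r = 1 then acc ++ PySem.Int.toStr (PySem.List.pyGetD r 0 0) ++ ", "
  else acc ++ PySem.Int.toStr (PySem.List.pyGetD r 0 0) ++ "-" ++
        PySem.Int.toStr (PySem.List.pyGetD r (-1) 0) ++ ", "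

def consecutive_true_indices (bool_list : List Bool) : String :=
  let true_indices := pvTrue bool_list 0
  let st := true_indices.foldl pvStepA ([], [])
  let consecutive_ranges := if st.2 = [] then st.1 else st.1 ++ [st.2]
  let output_str := consecutive_ranges.foldl pvOutStep ""
  PySem.Str.slice output_str none (some (-2))    -- output_str[:-2]

-- ===== PORT B =====
-- str(s) if s == e else str(s) + '-' + str(e)
def pvFrag (s e : Int) : String :=
  if s = e then PySem.Int.toStr s else PySem.Int.toStr s ++ "-" ++ PySem.Int.toStr e

-- body of 'for i, x in enumerate(bool_list)' over state (fragments, start)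
def pvStepB (st : List String × Option Int) (p : Int × Bool) : List String × Option Int :=
  if p.2 then
    match st.2 with
    | none => (st.1, some p.1)
    | some _ => st
  else
    match st.2 with
    | some s => (st.1 ++ [pvFrag s (p.1 - 1)], none)
    | none => st

def consecutive_true_indices_alt (bool_list : List Bool) : String :=
  let st := (PySem.List.enumerate bool_list 0).foldl pvStepB ([], none)
  let fragments :=
    match st.2 with
    | some s => st.1 ++ [pvFrag s (PySem.List.len bool_list - 1)]
    | none => st.1
  PySem.Str.join ", " fragments

-- ===== PRECONDITION & SPEC =====
def Spec_consecutive_true_indices (bool_list : List Bool) (out : String) : Prop := out = consecutive_true_indices_alt bool_list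
instance (bool_list : List Bool) (out : String) : Decidable (Spec_consecutive_true_indices bool_list out) := by unfold Spec_consecutive_true_indices; infer_instance

-- ===== CLAIM (what is proved, stated in full; the proofs are below) =====
def Claim_equal_consecutive_true_indices : Prop := ∀ (bool_list : List Bool), Dom_consecutive_true_indices bool_list → Spec_consecutive_true_indices bool_list (consecutive_true_indices bool_list)

-- ===== LEMMAS AND PROOFS =====

-- the run of consecutive integers s, s+1, …, s+n-1 (A's current_range always has this form)
def pvRun (s : Int) (n : Nat) : List Int := (List.range n).map (fun j => s + j)

-- how A renders one range
def pvRender (r : List Int) : String :=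
  if PySem.List.len r = 1 then PySem.Int.toStr (PySem.List.pyGetD r 0 0)
  else PySem.Int.toStr (PySem.List.pyGetD r 0 0) ++ "-" ++ PySem.Int.toStr (PySem.List.pyGetD r (-1) 0)

-- fragments A will emit from its final state
def pvFinishA (st : List (List Int) × List Int) : List String :=
  (if st.2 = [] then st.1 else st.1 ++ [st.2]).map pvRender

-- fragments B will emit from its final state, e = last index of the whole list
def pvFinishB (st : List String × Option Int) (e : Int) : List String :=
  match st.2 with
  | some s => st.1 ++ [pvFrag s e]
  | none => st.1

-- simulation invariant between A's and B's loop states, k = next index to be scanned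
def pvRel (k : Int) (stA : List (List Int) × List Int) (stB : List String × Option Int) : Prop :=
  (stA.2 = [] ∧ stB.2 = none ∧ stB.1 = stA.1.map pvRender)
  ∨ (∃ s n, 0 < n ∧ stA.2 = pvRun s n ∧ s + n - 1 ≤ k - 2 ∧ stB.2 = none ∧
      stB.1 = stA.1.map pvRender ++ [pvFrag s (s + n - 1)])
  ∨ (∃ s n, 0 < n ∧ stA.2 = pvRun s n ∧ s + n - 1 = k - 1 ∧ stB.2 = some s ∧
      stB.1 = stA.1.map pvRender)

lemma pvTrue_cons (b : Bool) (t : List Bool) (k : Int) :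
    pvTrue (b :: t) k = if b then k :: pvTrue t (k + 1) else pvTrue t (k + 1) := by
  simp [pvTrue, PySem.List.enumerate_cons, List.filterMap_cons]
  cases b <;> simp

lemma pvRun_one (s : Int) : pvRun s 1 = [s] := by simp [pvRun]

lemma pvRun_succ (s : Int) (n : Nat) : pvRun s (n + 1) = pvRun s n ++ [s + n] := by
  simp [pvRun, List.range_succ]

lemma pvRun_ne_nil (s : Int) {n : Nat} (h : 0 < n) : pvRun s n ≠ [] := by
  have : (pvRun s n).length = n := by simp [pvRun]
  intro hc
  rw [hc] at this
  simp at this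
  omega

lemma pvRun_length (s : Int) (n : Nat) : (pvRun s n).length = n := by simp [pvRun]

lemma pvRun_head (s : Int) {n : Nat} (h : 0 < n) : PySem.List.pyGetD (pvRun s n) 0 0 = s := by
  cases n with
  | zero => omega
  | succ m => simp [pvRun, List.range_succ_eq_map, PySem.List.pyGetD_zero_cons]

lemma pvRun_last (s : Int) {n : Nat} (h : 0 < n) :
    PySem.List.pyGetD (pvRun s n) (-1) 0 = s + n - 1 := by
  cases n with
  | zero => omega
  | succ m =>
    rw [pvRun_succ, PySem.List.pyGetD_neg_one_append_singleton]
    push_cast; ring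

lemma pvRender_run (s : Int) {n : Nat} (h : 0 < n) :
    pvRender (pvRun s n) = pvFrag s (s + n - 1) := by
  have hlen : PySem.List.len (pvRun s n) = (n : Int) := by
    simp [PySem.List.len_eq, pvRun_length]
  unfold pvRender pvFrag
  rw [hlen, pvRun_head s h, pvRun_last s h]
  rcases eq_or_ne n 1 with h1 | h1
  · subst h1; simp
  · rw [if_neg (by exact_mod_cast h1), if_neg (by omega)]

-- the core simulation: starting from related states, both loops finish to the same fragments
lemma pvMain : ∀ (l : List Bool) (k : Int) (stA : List (List Int) × List Int)
    (stB : List String × Option Int), pvRel k stA stB →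
    pvFinishA (List.foldl pvStepA stA (pvTrue l k)) =
      pvFinishB (List.foldl pvStepB stB (PySem.List.enumerate l k)) (k + l.length - 1) := by
  intro l
  induction l with
  | nil =>
    intro k stA stB hrel
    simp [pvTrue, PySem.List.enumerate_nil] at *
    rcases hrel with ⟨h2, hb2, hb1⟩ | ⟨s, n, hn, h2, hle, hb2, hb1⟩ | ⟨s, n, hn, h2, heq, hb2, hb1⟩
    · simp [pvFinishA, pvFinishB, h2, hb2, hb1]
    · simp [pvFinishA, pvFinishB, h2, hb2, hb1, pvRun_ne_nil s hn, pvRender_run s hn]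
    · simp [pvFinishA, pvFinishB, h2, hb2, hb1, pvRun_ne_nil s hn, pvRender_run s hn]
      rw [heq]
  | cons b t ih =>
    intro k stA stB hrel
    have harith : (k + 1) + t.length - 1 = k + (b :: t).length - 1 := by
      simp; ring
    rw [pvTrue_cons, PySem.List.enumerate_cons, List.foldl_cons, ← harith]
    cases b with
    | false =>
      simp only [if_neg (by simp : ¬ (false = true))]
      apply ih
      rcases hrel with ⟨h2, hb2, hb1⟩ | ⟨s, n, hn, h2, hle, hb2, hb1⟩ | ⟨s, n, hn, h2, heq, hb2, hb1⟩
      · left; simp [pvStepB, hb2, h2, hb1]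
      · right; left; exact ⟨s, n, hn, h2, by omega, by simp [pvStepB, hb2], by simp [pvStepB, hb2, hb1]⟩
      · right; left
        refine ⟨s, n, hn, h2, by omega, by simp [pvStepB, hb2], ?_⟩
        simp [pvStepB, hb2, hb1, heq]
    | true =>
      rw [if_pos rfl, List.foldl_cons]
      apply ih
      rcases hrel with ⟨h2, hb2, hb1⟩ | ⟨s, n, hn, h2, hle, hb2, hb1⟩ | ⟨s, n, hn, h2, heq, hb2, hb1⟩
      · -- start a new run at k
        right; right
        refine ⟨k, 1, by omega, ?_, by omega, by simp [pvStepB, hb2], ?_⟩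
        · simp [pvStepA, h2, pvRun_one]
        · simp [pvStepA, pvStepB, h2, hb2, hb1]
      · -- A closes the pending run and starts a new one at k
        right; right
        have hne : ¬ (k = PySem.List.pyGetD (pvRun s n) (-1) 0 + 1) := by
          rw [pvRun_last s hn]; omega
        refine ⟨k, 1, by omega, ?_, by omega, by simp [pvStepB, hb2], ?_⟩
        · simp [pvStepA, h2, pvRun_ne_nil s hn, hne, pvRun_one]
        · simp [pvStepA, pvStepB, h2, hb2, hb1, pvRun_ne_nil s hn, hne,
                pvRender_run s hn]
      · -- A extends the current run, B keeps its start
        right; right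
        have heq' : k = PySem.List.pyGetD (pvRun s n) (-1) 0 + 1 := by
          rw [pvRun_last s hn]; omega
        have hsk : s + (n : Int) = k := by omega
        refine ⟨s, n + 1, by omega, ?_, by push_cast; omega, by simp [pvStepB, hb2], ?_⟩
        · simp [pvStepA, h2, pvRun_ne_nil s hn, ← heq', pvRun_succ, hsk]
        · simp [pvStepA, pvStepB, h2, hb2, hb1, pvRun_ne_nil s hn, ← heq']
  

-- the output loop appends acc ++ render r ++ ', ' for each r
lemma pvOutfold (rs : List (List Int)) : ∀ acc : String,
    (List.foldl pvOutStep acc rs).toList =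
      acc.toList ++
        ((rs.map (fun r => (pvRender r).toList)).map (fun cs => cs ++ [',', ' '])).flatten := by
  induction rs with
  | nil => intro acc; simp
  | cons r rs ih =>
    intro acc
    rw [List.foldl_cons, ih]
    have : (pvOutStep acc r).toList = acc.toList ++ (pvRender r).toList ++ [',', ' '] := by
      unfold pvOutStep pvRender
      split_ifs <;> simp [String.toList_append]
    simp [this]

lemma pvFlatten_two_le (f : List Char) (fs : List (List Char)) :
    2 ≤ (((f :: fs).map (fun cs => cs ++ [',', ' '])).flatten).length := by
  simp; omega

-- chopping the trailing ', ' off the concatenation is joining with ', '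
lemma pvChop (fs : List (List Char)) :
    ((fs.map (fun cs => cs ++ [',', ' '])).flatten).take
        (((fs.map (fun cs => cs ++ [',', ' '])).flatten).length - 2) =
      PySem.Chars.join [',', ' '] fs := by
  induction fs with
  | nil => simp [PySem.Chars.join, List.intercalate]
  | cons f fs ih =>
    cases fs with
    | nil =>
      simp only [List.map_cons, List.map_nil, List.flatten_cons, List.flatten_nil,
        List.append_nil, PySem.Chars.join_singleton, List.length_append]
      rw [show f.length + [',', ' '].length - 2 = f.length by simp]
      exact List.take_left
    | cons g gs =>
      have h2 := pvFlatten_two_le g gs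
      rw [PySem.Chars.join_cons_cons]
      rw [List.map_cons, List.flatten_cons]
      have hlen : ((f ++ [',', ' ']) ++ ((((g :: gs)).map (fun cs => cs ++ [',', ' '])).flatten)).length
          = (f ++ [',', ' ']).length + ((((g :: gs)).map (fun cs => cs ++ [',', ' '])).flatten).length := by
        simp
        omega
      rw [hlen]
      rw [show (f ++ [',', ' ']).length +
            ((((g :: gs)).map (fun cs => cs ++ [',', ' '])).flatten).length - 2
          = (f ++ [',', ' ']).length +
            (((((g :: gs)).map (fun cs => cs ++ [',', ' '])).flatten).length - 2) by omega]
      rw [List.take_append, Nat.add_sub_cancel_left,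
          List.take_of_length_le (Nat.le_add_right _ _), ih, List.append_assoc]

-- A's render-and-chop equals B's join, for any list of ranges
lemma pvRenderJoin (rs : List (List Int)) :
    PySem.Str.slice (List.foldl pvOutStep "" rs) none (some (-2)) =
      PySem.Str.join ", " (rs.map pvRender) := by
  apply String.toList_inj.mp
  rw [PySem.Str.toList_join]
  have hs : (PySem.Str.slice (List.foldl pvOutStep "" rs) none (some (-2))).toList
      = (List.foldl pvOutStep "" rs).toList.take ((List.foldl pvOutStep "" rs).toList.length - 2) := by
    rw [PySem.Str.toList_slice, PySem.Chars.slice_eq_listSlice,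
        PySem.List.slice_to_neg_ofNat _ 2 (by omega)]
  rw [hs, pvOutfold]
  have h0 : ("" : String).toList = ([] : List Char) := rfl
  rw [h0, List.nil_append, pvChop]
  have hsep : (", " : String).toList = [',', ' '] := rfl
  rw [hsep, List.map_map]
  rfl

-- ===== VERDICT (by name: the statement is the Claim_ definition above) =====
theorem consecutive_true_indices_spec : Claim_equal_consecutive_true_indices := by
  intro bool_list _
  unfold Spec_consecutive_true_indices consecutive_true_indices consecutive_true_indices_alt
  simp only []
  rw [pvRenderJoin]
  have hmain := pvMain bool_list 0 ([], []) ([], none) (by left; simp)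
  unfold pvFinishA at hmain
  rw [hmain]
  have : (0 : Int) + bool_list.length - 1 = PySem.List.len bool_list - 1 := by
    simp [PySem.List.len_eq]
  rw [this]
  rfl
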